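-- pv_equiv track=rewrite | github.com/Chiamie/PhaseGateOne | PythonPhaseGateOne/student_grade_app.py | get_smallest_score_of_subjects
-- ===== SOURCE A (Python) =====
-- def get_smallest_score_of_subjects(class_scores):
-- 	subject_min = {}
-- 	subject_min_index = {}
-- 	for number in range(len(class_scores)):
-- 		student = class_scores[number]
-- 		for subject, score in student.items():
-- 			if subject not in ['Total', 'Average', 'Position']:
-- 				if subject in subject_min:
-- 					if score < subject_min[subject]:
-- 						subject_min[subject] = score
-- 						subject_min_index[subject] = number
-- 				else:
-- 					subject_min[subject] = score
-- 					subject_min_index[subject] = number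
-- 	return subject_min, subject_min_index
-- ===== SOURCE B (Python) =====
-- def get_smallest_score_of_subjects(class_scores):
--     EXCLUDED = ('Total', 'Average', 'Position')
--     # phase 1: group all (student_index, score) pairs per subject, in encounter order
--     table = {}
--     for number, student in enumerate(class_scores):
--         for subject, score in student.items():
--             if subject not in EXCLUDED:
--                 table.setdefault(subject, []).append((number, score))
--     # phase 2: one min() per subject; min returns the FIRST minimal pair, matching A's strict-< tie-break
--     subject_min = {}
--     subject_min_index = {}
--     for subject, pairs in table.items():
--         idx, sc = min(pairs, key=lambda p: p[1])
--         subject_min[subject] = sc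
--         subject_min_index[subject] = idx
--     return subject_min, subject_min_index
-- ===== Notes on version B (the rewrite author's own statement) =====
-- stated objective: alternative
-- what changed: B replaces A's running-minimum dict updates with a two-phase algorithm: first group all (index, score) pairs per subject into a table, then take one first-minimal min() per subject to build both result dicts.
import Mathlib
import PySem

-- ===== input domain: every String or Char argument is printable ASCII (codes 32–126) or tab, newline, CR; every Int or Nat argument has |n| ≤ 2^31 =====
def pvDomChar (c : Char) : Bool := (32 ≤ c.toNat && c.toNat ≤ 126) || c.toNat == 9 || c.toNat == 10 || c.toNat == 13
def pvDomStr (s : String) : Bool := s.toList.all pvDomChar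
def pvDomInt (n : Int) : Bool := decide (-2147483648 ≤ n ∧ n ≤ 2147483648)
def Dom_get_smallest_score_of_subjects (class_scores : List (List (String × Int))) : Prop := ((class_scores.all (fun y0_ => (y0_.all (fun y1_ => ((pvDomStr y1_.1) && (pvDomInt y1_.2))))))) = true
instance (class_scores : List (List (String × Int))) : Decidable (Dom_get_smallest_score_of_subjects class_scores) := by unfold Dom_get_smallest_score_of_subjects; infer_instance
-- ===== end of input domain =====

-- B groups (index, score) pairs per subject first and then takes one first-minimal min per subject,
-- instead of A's running-minimum updates; same cost, different decomposition.

-- ===== PORT A =====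
def get_smallest_score_of_subjects (class_scores : List (List (String × Int))) : (List (String × Int)) × (List (String × Int)) :=
  let res :=
    (PySem.List.pyRange 0 class_scores.length 1).foldl
      (fun (acc : PySem.Dict String Int × PySem.Dict String Int) number =>
        let student := PySem.List.pyGetD class_scores number []   -- class_scores[number]; index always in range
        student.foldl
          (fun (acc2 : PySem.Dict String Int × PySem.Dict String Int) p =>
            if ¬ (["Total", "Average", "Position"].contains p.1) then
              match acc2.1.get? p.1 with
              | some m =>
                if p.2 < m then (acc2.1.insert p.1 p.2, acc2.2.insert p.1 number) else acc2
              | none => (acc2.1.insert p.1 p.2, acc2.2.insert p.1 number)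
            else acc2)
          acc)
      (PySem.Dict.mk [], PySem.Dict.mk [])
  (res.1.items, res.2.items)

-- ===== PORT B =====
def get_smallest_score_of_subjects_alt (class_scores : List (List (String × Int))) : (List (String × Int)) × (List (String × Int)) :=
  -- phase 1: table[subject] = list of (number, score) in encounter order (setdefault+append = modify with default [])
  let table : PySem.Dict String (List (Int × Int)) :=
    (PySem.List.enumerate class_scores 0).foldl
      (fun t p =>
        p.2.foldl
          (fun t2 q =>
            if ¬ (["Total", "Average", "Position"].contains q.1) then
              t2.modify q.1 [] (fun l => l ++ [(p.1, q.2)])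
            else t2)
          t)
      (PySem.Dict.mk [])
  -- phase 2: one first-minimal min per subject (none case unreachable: every stored list is nonempty)
  let res :=
    table.items.foldl
      (fun (acc : PySem.Dict String Int × PySem.Dict String Int) e =>
        match PySem.List.min? e.2 (fun pr => pr.2) with
        | some pr => (acc.1.insert e.1 pr.2, acc.2.insert e.1 pr.1)
        | none => acc)
      (PySem.Dict.mk [], PySem.Dict.mk [])
  (res.1.items, res.2.items)

-- ===== PRECONDITION & SPEC =====
def Spec_get_smallest_score_of_subjects (class_scores : List (List (String × Int))) (out : (List (String × Int)) × (List (String × Int))) : Prop := out = get_smallest_score_of_subjects_alt class_scores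
instance (class_scores : List (List (String × Int))) (out : (List (String × Int)) × (List (String × Int))) : Decidable (Spec_get_smallest_score_of_subjects class_scores out) := by unfold Spec_get_smallest_score_of_subjects; infer_instance

-- ===== CLAIM (what is proved, stated in full; the proofs are below) =====
def Claim_equal_get_smallest_score_of_subjects : Prop := ∀ (class_scores : List (List (String × Int))), Dom_get_smallest_score_of_subjects class_scores → Spec_get_smallest_score_of_subjects class_scores (get_smallest_score_of_subjects class_scores)

-- ===== LEMMAS AND PROOFS =====

-- (number, subject, score) triples of non-excluded entries, in traversal order
def pvTr := Int × String × Int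

def pvTriples (cs : List (List (String × Int))) : List pvTr :=
  (PySem.List.enumerate cs 0).flatMap
    (fun p => (p.2.filter (fun q => ¬ (["Total", "Average", "Position"].contains q.1))).map
      (fun q => (p.1, q.1, q.2)))

def pvAStep (acc : PySem.Dict String Int × PySem.Dict String Int) (t : pvTr) :
    PySem.Dict String Int × PySem.Dict String Int :=
  match acc.1.get? t.2.1 with
  | some m => if t.2.2 < m then (acc.1.insert t.2.1 t.2.2, acc.2.insert t.2.1 t.1) else acc
  | none => (acc.1.insert t.2.1 t.2.2, acc.2.insert t.2.1 t.1)

def pvTStep (tbl : PySem.Dict String (List (Int × Int))) (t : pvTr) :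
    PySem.Dict String (List (Int × Int)) :=
  tbl.modify t.2.1 [] (fun l => l ++ [(t.1, t.2.2)])

def pvFStep (acc : PySem.Dict String Int × PySem.Dict String Int) (e : String × List (Int × Int)) :
    PySem.Dict String Int × PySem.Dict String Int :=
  match PySem.List.min? e.2 (fun pr => pr.2) with
  | some pr => (acc.1.insert e.1 pr.2, acc.2.insert e.1 pr.1)
  | none => acc

def pvOrdKeys (ts : List pvTr) : List String :=
  ts.foldl (fun ks t => if ks.contains t.2.1 then ks else ks ++ [t.2.1]) []

def pvGrp (k : String) (ts : List pvTr) : List (Int × Int) :=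
  (ts.filter (fun t => t.2.1 == k)).map (fun t => (t.1, t.2.2))

def pvBest (k : String) (ts : List pvTr) : Int × Int :=
  (PySem.List.min? (pvGrp k ts) (fun pr => pr.2)).getD (0, 0)


-- ---- generic facts about Dict.mk of a key-indexed map ----
theorem pv_contains_mkmap {β : Type} (ks : List String) (f : String → β) (k0 : String) :
    (PySem.Dict.mk (ks.map fun k => (k, f k))).contains k0 = ks.contains k0 := by
  induction ks with
  | nil => rfl
  | cons k ks ih =>
    simp only [List.map_cons, PySem.Dict.contains, List.any_cons] at ih ⊢
    rw [ih]
    by_cases h : k = k0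
    · subst h; simp [List.contains_cons]
    · simp [h, Ne.symm h]

theorem pv_get?_mkmap {β : Type} (ks : List String) (f : String → β) (k0 : String) :
    (PySem.Dict.mk (ks.map fun k => (k, f k))).get? k0 =
      if ks.contains k0 then some (f k0) else none := by
  induction ks with
  | nil => rfl
  | cons k ks ih =>
    rw [List.map_cons, PySem.Dict.get?_mk_cons, ih]
    by_cases h : k = k0
    · subst h; simp
    · have hb : (k == k0) = false := by simp [h]
      simp [hb, Ne.symm h]

theorem pv_insert_mkmap_pos {β : Type} (ks : List String) (f : String → β) (k0 : String) (v : β)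
    (h : ks.contains k0 = true) :
    (PySem.Dict.mk (ks.map fun k => (k, f k))).insert k0 v =
      PySem.Dict.mk (ks.map fun k => (k, if k = k0 then v else f k)) := by
  have hc : (PySem.Dict.mk (ks.map fun k => (k, f k))).contains k0 = true := by
    rw [pv_contains_mkmap]; exact h
  simp only [PySem.Dict.insert, hc, if_true, List.map_map]
  congr 1
  apply List.map_congr_left
  intro k _
  by_cases hk : k = k0
  · subst hk; simp
  · simp [hk]

theorem pv_insert_mkmap_neg {β : Type} (ks : List String) (f : String → β) (k0 : String) (v : β)
    (h : ks.contains k0 = false) :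
    (PySem.Dict.mk (ks.map fun k => (k, f k))).insert k0 v =
      PySem.Dict.mk (ks.map (fun k => (k, f k)) ++ [(k0, v)]) := by
  have hc : (PySem.Dict.mk (ks.map fun k => (k, f k))).contains k0 = false := by
    rw [pv_contains_mkmap]; exact h
  simp [PySem.Dict.insert, hc]

-- ---- min? over an appended element ----
theorem pv_min?_append_singleton {α : Type} (l : List α) (x : α) (key : α → Int) :
    PySem.List.min? (l ++ [x]) key =
      match PySem.List.min? l key with
      | none => some x
      | some m => if key x < key m then some x else some m := by
  simp only [PySem.List.min?, List.foldl_append, List.foldl_cons, List.foldl_nil]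
  generalize (List.foldl (fun acc x =>
      match acc with
      | none => some x
      | some m => if key x < key m then some x else some m) none l) = r
  cases r <;> rfl

-- ---- properties of pvOrdKeys / pvGrp ----
theorem pv_ordKeys_append (ts : List pvTr) (t : pvTr) :
    pvOrdKeys (ts ++ [t]) =
      if (pvOrdKeys ts).contains t.2.1 then pvOrdKeys ts else pvOrdKeys ts ++ [t.2.1] := by
  simp [pvOrdKeys, List.foldl_append]

theorem pv_grp_append (k : String) (ts : List pvTr) (t : pvTr) :
    pvGrp k (ts ++ [t]) = pvGrp k ts ++ (if t.2.1 = k then [(t.1, t.2.2)] else []) := by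
  by_cases h : t.2.1 = k <;> simp [pvGrp, List.filter_append, h]

theorem pv_grp_append_self (ts : List pvTr) (t : pvTr) :
    pvGrp t.2.1 (ts ++ [t]) = pvGrp t.2.1 ts ++ [(t.1, t.2.2)] := by
  rw [pv_grp_append]; simp

theorem pv_mem_ordKeys_aux (ts : List pvTr) (k : String) :
    ∀ a : List String,
      (k ∈ ts.foldl (fun ks t => if ks.contains t.2.1 then ks else ks ++ [t.2.1]) a ↔
        k ∈ a ∨ ∃ t ∈ ts, t.2.1 = k) := by
  induction ts with
  | nil => intro a; simp
  | cons t ts ih =>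
    intro a
    simp only [List.foldl_cons]
    by_cases h : a.contains t.2.1
    · rw [if_pos h, ih]
      constructor
      · rintro (ha | ht)
        · exact Or.inl ha
        · exact Or.inr ⟨_, by simp [ht.choose_spec], ht.choose_spec.2⟩
      · rintro (ha | ⟨u, hu, hk⟩)
        · exact Or.inl ha
        · rcases List.mem_cons.mp hu with rfl | hu
          · subst hk; exact Or.inl (by simpa using h)
          · exact Or.inr ⟨u, hu, hk⟩
    · rw [if_neg h, ih]
      constructor
      · rintro (ha | ht)
        · rcases List.mem_append.mp ha with ha | ha
          · exact Or.inl ha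
          · exact Or.inr ⟨t, List.mem_cons_self, (List.mem_singleton.mp ha).symm⟩
        · exact Or.inr ⟨_, List.mem_cons_of_mem _ ht.choose_spec.1, ht.choose_spec.2⟩
      · rintro (ha | ⟨u, hu, hk⟩)
        · exact Or.inl (List.mem_append_left _ ha)
        · rcases List.mem_cons.mp hu with rfl | hu
          · exact Or.inl (List.mem_append_right _ (by simp [hk]))
          · exact Or.inr ⟨u, hu, hk⟩

theorem pv_mem_ordKeys (ts : List pvTr) (k : String) :
    k ∈ pvOrdKeys ts ↔ ∃ t ∈ ts, t.2.1 = k := by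
  rw [pvOrdKeys, pv_mem_ordKeys_aux]; simp

theorem pv_nodup_ordKeys_aux (ts : List pvTr) :
    ∀ a : List String, a.Nodup →
      (ts.foldl (fun ks t => if ks.contains t.2.1 then ks else ks ++ [t.2.1]) a).Nodup := by
  induction ts with
  | nil => intro a ha; simpa
  | cons t ts ih =>
    intro a ha
    simp only [List.foldl_cons]
    by_cases h : a.contains t.2.1
    · rw [if_pos h]; exact ih a ha
    · rw [if_neg h]
      refine ih _ ?_
      simp only [List.contains_eq_mem, Bool.not_eq_true, decide_eq_false_iff_not] at h
      simp [List.nodup_append, ha]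
      intro x hx hxe
      exact h (hxe ▸ hx)
  
theorem pv_nodup_ordKeys (ts : List pvTr) : (pvOrdKeys ts).Nodup :=
  pv_nodup_ordKeys_aux ts [] List.nodup_nil

theorem pv_grp_ne_nil (ts : List pvTr) (k : String) (h : k ∈ pvOrdKeys ts) :
    pvGrp k ts ≠ [] := by
  rcases (pv_mem_ordKeys ts k).mp h with ⟨t, ht, hk⟩
  simp only [pvGrp, ne_eq, List.map_eq_nil_iff, List.filter_eq_nil_iff]
  intro hall
  exact hall t ht (by simp [hk])

theorem pv_grp_nil (ts : List pvTr) (k : String) (h : k ∉ pvOrdKeys ts) :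
    pvGrp k ts = [] := by
  by_contra hne
  rcases List.exists_mem_of_ne_nil _ hne with ⟨p, hp⟩
  simp only [pvGrp, List.mem_map, List.mem_filter] at hp
  rcases hp with ⟨t, ⟨ht, hk⟩, _⟩
  exact h ((pv_mem_ordKeys ts k).mpr ⟨t, ht, by simpa using hk⟩)

-- ---- the A-side characterisation ----
theorem pv_LA (ts : List pvTr) :
    ts.foldl pvAStep (PySem.Dict.mk [], PySem.Dict.mk []) =
      (PySem.Dict.mk ((pvOrdKeys ts).map fun k => (k, (pvBest k ts).2)),
       PySem.Dict.mk ((pvOrdKeys ts).map fun k => (k, (pvBest k ts).1))) := by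
  induction ts using List.reverseRecOn with
  | nil => rfl
  | append_singleton ts t ih =>
    rw [List.foldl_append, List.foldl_cons, List.foldl_nil, ih]
    have hbest_ne : ∀ k ∈ pvOrdKeys ts, k ≠ t.2.1 → pvBest k (ts ++ [t]) = pvBest k ts := by
      intro k _ hk
      rw [pvBest, pvBest, pv_grp_append]
      simp [Ne.symm hk]
    by_cases hc : (pvOrdKeys ts).contains t.2.1
    · -- key already present
      have hmem : t.2.1 ∈ pvOrdKeys ts := by simpa using hc
      have hne := pv_grp_ne_nil ts t.2.1 hmem
      obtain ⟨m, hm⟩ : ∃ m, PySem.List.min? (pvGrp t.2.1 ts) (fun pr => pr.2) = some m := by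
        cases hmin : PySem.List.min? (pvGrp t.2.1 ts) (fun pr => pr.2) with
        | none => exact absurd ((PySem.List.min?_eq_none_iff _ _).mp hmin) hne
        | some m => exact ⟨m, rfl⟩
      have hbestts : pvBest t.2.1 ts = m := by rw [pvBest, hm]; rfl
      have hget : (PySem.Dict.mk ((pvOrdKeys ts).map fun k => (k, (pvBest k ts).2))).get? t.2.1
          = some m.2 := by rw [pv_get?_mkmap, if_pos hc, hbestts]
      have hbest_t : pvBest t.2.1 (ts ++ [t]) =
          if t.2.2 < m.2 then (t.1, t.2.2) else m := by
        rw [pvBest, pv_grp_append_self, pv_min?_append_singleton, hm]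
        by_cases hlt : t.2.2 < m.2 <;> simp [hlt]
      rw [pv_ordKeys_append, if_pos hc]
      simp only [pvAStep, hget]
      by_cases hlt : t.2.2 < m.2
      · rw [if_pos hlt]
        simp only [pv_insert_mkmap_pos _ _ _ _ hc]
        congr 1 <;>
        · congr 1
          apply List.map_congr_left
          intro k hk
          by_cases hkt : k = t.2.1
          · subst hkt; rw [hbest_t, if_pos hlt]; simp
          · rw [hbest_ne k hk hkt]; simp [hkt]
      · rw [if_neg hlt]
        have : ∀ k ∈ pvOrdKeys ts, pvBest k (ts ++ [t]) = pvBest k ts := by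
          intro k hk
          by_cases hkt : k = t.2.1
          · subst hkt; rw [hbest_t, if_neg hlt, hbestts]
          · exact hbest_ne k hk hkt
        congr 1 <;>
        · congr 1
          apply List.map_congr_left
          intro k hk
          rw [this k hk]
    · -- new key
      have hmem : t.2.1 ∉ pvOrdKeys ts := by simpa using hc
      have hget : (PySem.Dict.mk ((pvOrdKeys ts).map fun k => (k, (pvBest k ts).2))).get? t.2.1
          = none := by rw [pv_get?_mkmap, if_neg (by simpa using hmem)]
      have hbest_t : pvBest t.2.1 (ts ++ [t]) = (t.1, t.2.2) := by
        rw [pvBest, pv_grp_append_self, pv_min?_append_singleton, pv_grp_nil ts _ hmem]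
        rfl
      rw [pv_ordKeys_append, if_neg hc]
      simp only [pvAStep, hget]
      congr 1 <;>
      · rw [pv_insert_mkmap_neg _ _ _ _ (by simpa using hmem)]
        congr 1
        rw [List.map_append]
        congr 1
        · apply List.map_congr_left
          intro k hk
          rw [hbest_ne k hk (fun h => hmem (h ▸ hk))]
        · simp [hbest_t]

-- ---- the B-side table characterisation ----
theorem pv_LT (ts : List pvTr) :
    ts.foldl pvTStep (PySem.Dict.mk []) =
      PySem.Dict.mk ((pvOrdKeys ts).map fun k => (k, pvGrp k ts)) := by
  induction ts using List.reverseRecOn with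
  | nil => rfl
  | append_singleton ts t ih =>
    rw [List.foldl_append, List.foldl_cons, List.foldl_nil, ih]
    have hgrp_ne : ∀ k ∈ pvOrdKeys ts, k ≠ t.2.1 → pvGrp k (ts ++ [t]) = pvGrp k ts := by
      intro k _ hk
      rw [pv_grp_append]; simp [Ne.symm hk]
    simp only [pvTStep, PySem.Dict.modify, PySem.Dict.getD, pv_get?_mkmap]
    rw [pv_ordKeys_append]
    by_cases hc : (pvOrdKeys ts).contains t.2.1
    · rw [if_pos hc, if_pos hc]
      rw [pv_insert_mkmap_pos _ _ _ _ hc]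
      congr 1
      apply List.map_congr_left
      intro k hk
      by_cases hkt : k = t.2.1
      · subst hkt
        rw [pv_grp_append_self]
        simp
      · rw [hgrp_ne k hk hkt]; simp [hkt]
    · have hmem : t.2.1 ∉ pvOrdKeys ts := by simpa using hc
      rw [if_neg hc, if_neg hc]
      rw [pv_insert_mkmap_neg _ _ _ _ (by simpa using hmem)]
      congr 1
      rw [List.map_append]
      congr 1
      · apply List.map_congr_left
        intro k hk
        rw [hgrp_ne k hk (fun h => hmem (h ▸ hk))]
      · simp [pv_grp_append_self, pv_grp_nil ts _ hmem]

-- ---- the finalisation pass ----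
theorem pv_LF (ks : List String) (f : String → List (Int × Int))
    (hn : ks.Nodup) (hne : ∀ k ∈ ks, f k ≠ []) :
    ((ks.map fun k => (k, f k)).foldl pvFStep (PySem.Dict.mk [], PySem.Dict.mk [])) =
      (PySem.Dict.mk (ks.map fun k => (k, ((PySem.List.min? (f k) (fun pr => pr.2)).getD (0, 0)).2)),
       PySem.Dict.mk (ks.map fun k => (k, ((PySem.List.min? (f k) (fun pr => pr.2)).getD (0, 0)).1))) := by
  induction ks using List.reverseRecOn with
  | nil => rfl
  | append_singleton ks k0 ih =>
    simp only [List.map_append, List.foldl_append, List.map_cons, List.map_nil,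
      List.foldl_cons, List.foldl_nil]
    have hn' : ks.Nodup := (List.nodup_append.mp hn).1
    have hk0 : k0 ∉ ks := by
      intro hmem
      obtain ⟨-, -, hd⟩ := List.nodup_append.mp hn
      exact hd k0 hmem k0 (by simp) rfl
    rw [ih hn' (fun k hk => hne k (List.mem_append_left _ hk))]
    have hfne : f k0 ≠ [] := hne k0 (by simp)
    obtain ⟨m, hm⟩ : ∃ m, PySem.List.min? (f k0) (fun pr => pr.2) = some m := by
      cases hmin : PySem.List.min? (f k0) (fun pr => pr.2) with
      | none => exact absurd ((PySem.List.min?_eq_none_iff _ _).mp hmin) hfne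
      | some m => exact ⟨m, rfl⟩
    have hcon : ks.contains k0 = false := by simpa using hk0
    simp only [pvFStep, hm]
    rw [pv_insert_mkmap_neg _ _ _ _ hcon, pv_insert_mkmap_neg _ _ _ _ hcon]
    simp

-- ---- flattening the nested loops to the triple list ----
theorem pv_flat {σ : Type} (g : σ → pvTr → σ) (cs : List (List (String × Int))) (a : σ) :
    (PySem.List.enumerate cs 0).foldl
      (fun acc p => p.2.foldl
        (fun a2 q =>
          if ¬ (["Total", "Average", "Position"].contains q.1) then g a2 (p.1, q.1, q.2)
          else a2) acc) a
    = (pvTriples cs).foldl g a := by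
  rw [pvTriples, List.foldl_flatMap]
  congr 1
  funext acc p
  rw [List.foldl_map, List.foldl_filter]
  simp

theorem pv_portA_flat (cs : List (List (String × Int))) :
    get_smallest_score_of_subjects cs =
      (((pvTriples cs).foldl pvAStep (PySem.Dict.mk [], PySem.Dict.mk [])).1.items,
       ((pvTriples cs).foldl pvAStep (PySem.Dict.mk [], PySem.Dict.mk [])).2.items) := by
  unfold get_smallest_score_of_subjects
  rw [← pv_flat pvAStep cs]
  rw [PySem.List.enumerate_eq_map_pyRange cs ([] : List (String × Int)), List.foldl_map]
  simp only [PySem.List.len]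
  rfl

theorem pv_portB_flat (cs : List (List (String × Int))) :
    get_smallest_score_of_subjects_alt cs =
      ((((pvTriples cs).foldl pvTStep (PySem.Dict.mk [])).items.foldl pvFStep
          (PySem.Dict.mk [], PySem.Dict.mk [])).1.items,
       (((pvTriples cs).foldl pvTStep (PySem.Dict.mk [])).items.foldl pvFStep
          (PySem.Dict.mk [], PySem.Dict.mk [])).2.items) := by
  unfold get_smallest_score_of_subjects_alt
  rw [← pv_flat pvTStep cs]
  rfl

-- ===== VERDICT (by name: the statement is the Claim_ definition above) =====
theorem get_smallest_score_of_subjects_spec : Claim_equal_get_smallest_score_of_subjects := by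
  intro cs _
  unfold Spec_get_smallest_score_of_subjects
  rw [pv_portA_flat, pv_portB_flat, pv_LA, pv_LT]
  rw [pv_LF (pvOrdKeys (pvTriples cs)) (fun k => pvGrp k (pvTriples cs))
        (pv_nodup_ordKeys _) (fun k hk => pv_grp_ne_nil _ k hk)]
  rfl
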